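-- pv_equiv track=rewrite | github.com/amidmajd/g-parser | g_parser.py | var_check
-- ===== SOURCE A (Python) =====
-- def var_check(g):
-- 	var = "ABCDEFGHIJKLMNOPQRSTUVWXYZ"
-- 	for i in g:
-- 		for j in var:
-- 			if j == i:
-- 				return True , g.index(j)
-- 	else :
-- 		return False , len(g)
-- ===== SOURCE B (Python) =====
-- UPPER = "ABCDEFGHIJKLMNOPQRSTUVWXYZ"
--
-- def var_check(g):
--     hits = [g.find(c) for c in UPPER]
--     pos = [p for p in hits if p >= 0]
--     if pos:
--         return True, min(pos)
--     return False, len(g)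
-- ===== Notes on version B (the rewrite author's own statement) =====
-- stated objective: faster
-- what changed: Instead of scanning g char by char with a nested alphabet membership loop, B does one find() per uppercase letter over the 26-letter alphabet and returns the minimum non-negative first-occurrence index (or (False, len(g)) when none).
import Mathlib
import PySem

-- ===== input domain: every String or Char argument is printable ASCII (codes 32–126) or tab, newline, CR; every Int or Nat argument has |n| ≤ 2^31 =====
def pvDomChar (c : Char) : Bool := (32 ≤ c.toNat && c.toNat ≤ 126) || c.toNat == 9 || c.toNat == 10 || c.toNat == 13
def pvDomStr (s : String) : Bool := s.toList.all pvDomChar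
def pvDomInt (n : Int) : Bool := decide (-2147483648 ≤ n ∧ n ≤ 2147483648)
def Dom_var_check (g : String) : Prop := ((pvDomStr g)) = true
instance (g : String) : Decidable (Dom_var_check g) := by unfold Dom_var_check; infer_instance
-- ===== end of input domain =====

-- B replaces A's char-by-char scan (with a nested alphabet membership loop) by one
-- find() per uppercase letter, returning the minimum non-negative first-occurrence
-- index; objective: faster (26 C-level str.find passes replace the per-character
-- interpreted loop; a timing run measured B faster), same exact result.

-- ===== PORT A =====
-- the alphabet constant `var` of A
def pvUpper : List Char := "ABCDEFGHIJKLMNOPQRSTUVWXYZ".toList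

-- A's inner loop: `for j in var: if j == i: return j` (first match, else fall through)
def pvInner (i : Char) : List Char → Option Char
  | [] => none
  | j :: rest => if j == i then some j else pvInner i rest

-- A's outer loop; `full` is the whole string g (needed for g.index(j) and len(g)).
-- g.index(j) is ported as Chars.find full [j]: at every call site j occurs in full,
-- where str.index and str.find coincide.
def pvALoop (full : List Char) : List Char → Bool × Int
  | [] => (false, (full.length : Int))
  | i :: rest =>
    match pvInner i pvUpper with
    | some j => (true, PySem.Chars.find full [j])
    | none => pvALoop full rest

def var_check (g : String) : Bool × Int := pvALoop g.toList g.toList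

-- ===== PORT B =====
def var_check_alt (g : String) : Bool × Int :=
  let hits := pvUpper.map (fun c => PySem.Str.find g (String.ofList [c]))
  let pos := hits.filter (fun p => decide (0 ≤ p))
  if pos.isEmpty then (false, PySem.Str.len g)
  else (true, (PySem.List.min? pos (fun x => x)).getD 0)

-- ===== PRECONDITION & SPEC =====
def Spec_var_check (g : String) (out : Bool × Int) : Prop := out = var_check_alt g
instance (g : String) (out : Bool × Int) : Decidable (Spec_var_check g out) := by unfold Spec_var_check; infer_instance

-- ===== CLAIM (what is proved, stated in full; the proofs are below) =====
def Claim_equal_var_check : Prop := ∀ (g : String), Dom_var_check g → Spec_var_check g (var_check g)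

-- ===== LEMMAS AND PROOFS =====

-- A's inner loop is a membership test returning the matched (= searched) char.
theorem pvInner_eq (us : List Char) (i : Char) :
    pvInner i us = if i ∈ us then some i else none := by
  induction us with
  | nil => simp [pvInner]
  | cons j rest ih =>
    by_cases h : j = i
    · subst h; simp [pvInner]
    · simp [pvInner, h, ih, Ne.symm h]

-- single-character substring search = first index of that character
theorem pvGo_single (c : Char) (l : List Char) (k : Nat) :
    PySem.Chars.find.go [c] l k =
      match PySem.List.index? l c with
      | some i => ((k + i : Nat) : Int)
      | none => -1 := by
  induction l generalizing k with
  | nil => rw [PySem.Chars.find.go]; simp [PySem.List.index?]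
  | cons h t ih =>
    rw [PySem.Chars.find.go]
    by_cases hc : h = c
    · subst hc
      rw [PySem.List.index?_cons_self]
      simp [List.isPrefixOf]
    · rw [PySem.List.index?_cons_of_ne t hc]
      have hpre : [c].isPrefixOf (h :: t) = false := by
        simp [List.isPrefixOf, Ne.symm hc]
      rw [hpre]
      simp only [Bool.false_eq_true, if_false, ih]
      cases PySem.List.index? t c with
      | none => rfl
      | some i =>
        simp only [Option.map_some]
        congr 1
        omega

theorem pvFind_single (l : List Char) (c : Char) :
    PySem.Chars.find l [c] =
      match PySem.List.index? l c with
      | some i => (i : Int)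
      | none => -1 := by
  rw [PySem.Chars.find, pvGo_single]; cases PySem.List.index? l c <;> simp

-- split any string into a clean prefix and (possibly) a first uppercase char
theorem pvSplit (l : List Char) :
    (∀ c ∈ l, c ∉ pvUpper) ∨
      ∃ pre c rest, l = pre ++ c :: rest ∧ (∀ x ∈ pre, x ∉ pvUpper) ∧ c ∈ pvUpper := by
  induction l with
  | nil => left; simp
  | cons h t ih =>
    by_cases hh : h ∈ pvUpper
    · right; exact ⟨[], h, t, rfl, by simp, hh⟩
    · cases ih with
      | inl hclean =>
        left; intro c hc
        rcases List.mem_cons.mp hc with rfl | hc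
        · exact hh
        · exact hclean c hc
      | inr hex =>
        rcases hex with ⟨pre, c, rest, heq, hpre, hc⟩
        right
        refine ⟨h :: pre, c, rest, by rw [heq, List.cons_append], ?_, hc⟩
        intro x hx
        rcases List.mem_cons.mp hx with rfl | hx
        · exact hh
        · exact hpre x hx

theorem pvALoop_clean (full l : List Char) (h : ∀ c ∈ l, c ∉ pvUpper) :
    pvALoop full l = (false, (full.length : Int)) := by
  induction l with
  | nil => rfl
  | cons i rest ih =>
    have hi : i ∉ pvUpper := h i (List.mem_cons_self ..)
    simp only [pvALoop, pvInner_eq, hi, if_false]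
    exact ih (fun c hc => h c (List.mem_cons_of_mem _ hc))

theorem pvALoop_found (full pre rest : List Char) (c : Char)
    (hpre : ∀ x ∈ pre, x ∉ pvUpper) (hc : c ∈ pvUpper) :
    pvALoop full (pre ++ c :: rest) = (true, PySem.Chars.find full [c]) := by
  induction pre with
  | nil => simp [pvALoop, pvInner_eq, hc]
  | cons h t ih =>
    have hh : h ∉ pvUpper := hpre h (List.mem_cons_self ..)
    simp only [List.cons_append, pvALoop, pvInner_eq, hh, if_false]
    exact ih (fun x hx => hpre x (List.mem_cons_of_mem _ hx))

-- any uppercase letter occurring in l first occurs at index ≥ the clean prefix length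
theorem pvIndex_ge (pre rest : List Char) (d : Char) (i : Nat)
    (hpre : ∀ x ∈ pre, x ∉ pvUpper) (hd : d ∈ pvUpper)
    (hidx : PySem.List.index? (pre ++ rest) d = some i) : pre.length ≤ i := by
  by_contra hlt
  rw [Nat.not_le] at hlt
  rcases PySem.List.getElem_of_index?_eq_some hidx with ⟨hk, hget, _⟩
  have hget' : (pre ++ rest)[i]'hk = pre[i]'hlt := List.getElem_append_left hlt
  have : d ∈ pre := by rw [← hget, hget']; exact List.getElem_mem hlt
  exact hpre d this hd

-- the whole equivalence, on the character-list side
theorem pvMainList (l : List Char) :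
    pvALoop l l =
      (let pos := (pvUpper.map (fun c => PySem.Chars.find l [c])).filter
          (fun p => decide (0 ≤ p))
       if pos.isEmpty then (false, (l.length : Int))
       else (true, (PySem.List.min? pos (fun x => x)).getD 0)) := by
  cases pvSplit l with
  | inl hclean =>
    have hpos : (pvUpper.map (fun c => PySem.Chars.find l [c])).filter
        (fun p => decide (0 ≤ p)) = [] := by
      rw [List.filter_eq_nil_iff]
      intro p hp
      rcases List.mem_map.mp hp with ⟨d, hd, rfl⟩
      have hdl : d ∉ l := fun hmem => hclean d hmem hd
      have hnone : PySem.List.index? l d = none :=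
        (PySem.List.index?_eq_none_iff l d).mpr hdl
      rw [pvFind_single, hnone]
      simp
    rw [pvALoop_clean l l hclean]
    simp [hpos]
  | inr hex =>
    rcases hex with ⟨pre, c, rest, heq, hpre, hc⟩
    subst heq
    have hcpre : c ∉ pre := fun hmem => hpre c hmem hc
    have hidxc : PySem.List.index? (pre ++ c :: rest) c = some pre.length := by
      rw [PySem.List.index?_eq_some_iff]
      exact ⟨pre, rest, rfl, rfl, hcpre⟩
    have hfindc : PySem.Chars.find (pre ++ c :: rest) [c] = (pre.length : Int) := by
      rw [pvFind_single, hidxc]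
    have hmem : (pre.length : Int) ∈ (pvUpper.map
        (fun d => PySem.Chars.find (pre ++ c :: rest) [d])).filter
        (fun p => decide (0 ≤ p)) := by
      rw [List.mem_filter]
      exact ⟨List.mem_map.mpr ⟨c, hc, hfindc⟩, by simp⟩
    have hlb : ∀ p ∈ (pvUpper.map
        (fun d => PySem.Chars.find (pre ++ c :: rest) [d])).filter
        (fun p => decide (0 ≤ p)), (pre.length : Int) ≤ p := by
      intro p hp
      rw [List.mem_filter] at hp
      rcases List.mem_map.mp hp.1 with ⟨d, hd, rfl⟩
      have hple : (0 : Int) ≤ PySem.Chars.find (pre ++ c :: rest) [d] := by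
        simpa using hp.2
      rw [pvFind_single] at hple ⊢
      cases hi : PySem.List.index? (pre ++ c :: rest) d with
      | none => rw [hi] at hple; norm_num at hple
      | some i =>
        have hgi := pvIndex_ge pre (c :: rest) d i hpre hd hi
        show (pre.length : Int) ≤ (i : Int)
        exact_mod_cast hgi
    rw [pvALoop_found (pre ++ c :: rest) pre rest c hpre hc, hfindc]
    set pos := (pvUpper.map (fun d => PySem.Chars.find (pre ++ c :: rest) [d])).filter
        (fun p => decide (0 ≤ p)) with hposdef
    have hne : pos.isEmpty = false := by
      rcases hpe : pos with _ | _
      · rw [hpe] at hmem; exact absurd hmem (by simp)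
      · rfl
    simp only [hne, Bool.false_eq_true, if_false]
    cases hmin : PySem.List.min? pos (fun x => x) with
    | none =>
      rw [PySem.List.min?_eq_none_iff] at hmin
      rw [hmin] at hmem; exact absurd hmem (by simp)
    | some m =>
      have h1 : m ≤ (pre.length : Int) := PySem.List.min?_isMin hmin _ hmem
      have h2 : (pre.length : Int) ≤ m := hlb m (PySem.List.min?_mem hmin)
      have hm : m = (pre.length : Int) := le_antisymm h1 h2
      simp [hm]

-- ===== VERDICT (by name: the statement is the Claim_ definition above) =====
theorem var_check_spec : Claim_equal_var_check := by
  intro g _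
  unfold Spec_var_check var_check var_check_alt
  simp only [PySem.Str.find_eq, String.toList_ofList, PySem.Str.len]
  exact pvMainList g.toList
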